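-- pv_equiv track=rewrite | github.com/RideGreg/LeetCode | Python/longest-word-in-dictionary-through-deleting.py | findLongestWord_noSort
-- ===== SOURCE A (Python) =====
-- def findLongestWord_noSort(s, d):
--     ans = ''
--     for w in d:
--         if len(w) == len(ans) and w < ans or len(w) > len(ans):
--             i, j = 0, 0
--             while i < len(s) and j < len(w):
--                 if s[i] == w[j]:
--                     j += 1
--                 i += 1
--             if j == len(w):
--                 ans = w
--     return ans
-- ===== SOURCE B (Python) =====
-- def findLongestWord_noSort(s, d):
--     # Best-first search: sort by key (-len, lexicographic) once, then return the
--     # FIRST candidate that is a subsequence of s, hopping through s with str.find.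
--     def matches(w):
--         j = 0
--         for c in w:
--             j = s.find(c, j)
--             if j == -1:
--                 return False
--             j += 1
--         return True
--
--     for w in sorted(d, key=lambda w: (-len(w), w)):
--         if matches(w):
--             return w
--     return ''
-- ===== Notes on version B (the rewrite author's own statement) =====
-- stated objective: faster
-- what changed: Replaces A's guarded running-best scan (per-word two-pointer walk of s run whenever the word could beat the current answer) with a best-first strategy: sort d once by key (-len(w), w) and return the first word of that order that is a subsequence of s, the subsequence test hopping through s with str.find cursors instead of a character-by-character index pair.
import Mathlib
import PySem

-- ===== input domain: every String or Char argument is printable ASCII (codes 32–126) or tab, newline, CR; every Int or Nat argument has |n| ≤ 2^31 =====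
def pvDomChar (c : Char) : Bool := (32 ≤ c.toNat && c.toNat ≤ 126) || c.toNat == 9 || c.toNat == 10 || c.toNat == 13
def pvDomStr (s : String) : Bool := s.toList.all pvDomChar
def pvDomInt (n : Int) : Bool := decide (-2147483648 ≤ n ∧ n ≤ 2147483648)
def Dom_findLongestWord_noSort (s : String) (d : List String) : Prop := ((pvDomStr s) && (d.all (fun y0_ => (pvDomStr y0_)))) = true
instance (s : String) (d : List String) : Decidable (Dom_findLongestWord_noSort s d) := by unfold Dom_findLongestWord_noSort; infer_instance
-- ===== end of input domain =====

-- B sorts d once by the key (-len(w), w) and returns the first word of that order that is a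
-- subsequence of s (cursor hops via str.find), instead of A's guarded running-best scan; alternative decomposition, same results.


-- ===== PORT A =====
-- A's inner while loop: i walks s, j walks w; kept as a fold over s carrying the
-- not-yet-matched suffix of w (the suffix starting at j).
def pvMatchStep (r : List Char) (c : Char) : List Char :=
  match r with
  | [] => []
  | x :: xs => if c = x then xs else r

def findLongestWord_noSort (s : String) (d : List String) : String :=
  d.foldl (fun ans w =>
    if (w.toList.length == ans.toList.length && PySem.Chars.strLt w.toList ans.toList)
        || ans.toList.length < w.toList.length then
      -- while i < len(s) and j < len(w): …   then  if j == len(w): ans = w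
      if List.foldl pvMatchStep w.toList s.toList = [] then w else ans
    else ans) ""

-- ===== PORT B =====
-- matches(w): a find-cursor j hops to the next occurrence of each character of w in s.
def pvMatches (s : List Char) : List Char → Int → Bool
  | [], _ => true
  | c :: w', j =>
    let j' := PySem.Chars.findFrom s [c] j
    if j' = -1 then false else pvMatches s w' (j' + 1)

-- 'for w in sorted(d, key=…): if matches(w): return w' / 'return ""'
def pvFirstMatch (s : List Char) : List String → String
  | [] => ""
  | w :: ws => if pvMatches s w.toList 0 then w else pvFirstMatch s ws

-- Python's tuple key (-len(w), w) is the lexicographic order on Int ×ₗ List Char.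
def pvKey (w : String) : Int ×ₗ List Char := toLex (-(w.toList.length : Int), w.toList)

def findLongestWord_noSort_alt (s : String) (d : List String) : String :=
  pvFirstMatch s.toList (PySem.List.sorted d pvKey)

-- ===== PRECONDITION & SPEC =====
def Spec_findLongestWord_noSort (s : String) (d : List String) (out : String) : Prop := out = findLongestWord_noSort_alt s d
instance (s : String) (d : List String) (out : String) : Decidable (Spec_findLongestWord_noSort s d out) := by unfold Spec_findLongestWord_noSort; infer_instance

-- ===== CLAIM (what is proved, stated in full; the proofs are below) =====
def Claim_equal_findLongestWord_noSort : Prop := ∀ (s : String) (d : List String), Dom_findLongestWord_noSort s d → Spec_findLongestWord_noSort s d (findLongestWord_noSort s d)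

-- ===== LEMMAS AND PROOFS =====

-- A's fold over s never revives an exhausted pattern.
theorem pvMatchStep_nil (s : List Char) : List.foldl pvMatchStep [] s = [] := by
  induction s with
  | nil => rfl
  | cons a s ih => simpa [pvMatchStep] using ih

-- A's two-pointer test succeeds exactly on subsequences.
theorem pvFoldA_iff_sublist (s w : List Char) :
    List.foldl pvMatchStep w s = [] ↔ List.Sublist w s := by
  induction s generalizing w with
  | nil =>
    simp only [List.foldl_nil, List.sublist_nil]
  | cons a t ih =>
    cases w with
    | nil => simp [pvMatchStep, pvMatchStep_nil]
    | cons c w' =>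
      by_cases hac : a = c
      · subst hac
        rw [List.foldl_cons, show pvMatchStep (a :: w') a = w' from by simp [pvMatchStep]]
        rw [ih w', List.cons_sublist_cons]
      · rw [List.foldl_cons, show pvMatchStep (c :: w') a = c :: w' from by simp [pvMatchStep, hac]]
        rw [ih (c :: w')]
        constructor
        · intro h; exact h.cons a
        · intro h
          cases h with
          | cons _ h => exact h
          | cons₂ => exact absurd rfl hac

-- B's find-cursor test succeeds exactly on subsequences of the unread suffix.
theorem pvMatches_iff_sublist (s : List Char) (w : List Char) (n : Nat) (hn : n ≤ s.length) :
    pvMatches s w (n : Int) = true ↔ List.Sublist w (s.drop n) := by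
  induction w generalizing n with
  | nil => simp [pvMatches]
  | cons c w' ih =>
    rw [show pvMatches s (c :: w') (n : Int)
        = (if PySem.Chars.findFrom s [c] (n : Int) = -1 then false
           else pvMatches s w' (PySem.Chars.findFrom s [c] (n : Int) + 1)) from rfl]
    rw [PySem.Chars.findFrom_natCast s [c] n hn]
    by_cases hf : PySem.Chars.find (List.drop n s) [c] = -1
    · simp only [if_pos hf, if_true]
      rw [PySem.Chars.find_eq_neg_one_iff] at hf
      simp only [Bool.false_eq_true, false_iff]
      intro hsub
      apply hf
      have hc : c ∈ List.drop n s := hsub.subset (List.mem_cons_self)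
      obtain ⟨u, v, huv⟩ := List.append_of_mem hc
      exact ⟨u, v, by simp [huv]⟩
    · -- found: f = first occurrence of c in s.drop n
      set f := PySem.Chars.find (List.drop n s) [c] with hfdef
      have hf0 : 0 ≤ f := by
        have := PySem.Chars.neg_one_le_find (List.drop n s) [c]
        omega
      have hspec := PySem.Chars.find_spec (s := List.drop n s) (sub := [c]) hf0
      obtain ⟨hpre, hmin⟩ := hspec
      simp only [if_neg hf]
      rw [if_neg (show ¬ ((n : Int) + f = -1) from by omega)]
      set i0 : Nat := n + f.toNat with hi0
      have hdropi0 : List.drop f.toNat (List.drop n s) = List.drop i0 s := by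
        rw [List.drop_drop]
      obtain ⟨r, hr⟩ := hpre
      have hr' : List.drop i0 s = c :: r := by rw [← hdropi0, ← hr]; rfl
      have hi0len : i0 < s.length := by
        by_contra hc
        have : List.drop i0 s = [] := List.drop_eq_nil_of_le (by omega)
        rw [hr'] at this; exact List.cons_ne_nil _ _ this
      have hcast : (n : Int) + f + 1 = ((i0 + 1 : Nat) : Int) := by
        simp [hi0]; omega
      rw [hcast, ih (i0 + 1) (by omega)]
      have hr'' : List.drop (i0 + 1) s = r := by
        have := List.drop_drop (i := 1) (j := i0) (l := s)
        rw [hr'] at this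
        simpa using this.symm
      constructor
      · -- w' <+ s.drop (i0+1)  →  c :: w' <+ s.drop n
        intro h
        have h1 : List.Sublist (c :: w') (List.drop i0 s) := by
          rw [hr', ← hr'']
          exact List.cons_sublist_cons.mpr h
        exact h1.trans (List.drop_sublist_drop_left s (i := n) (j := i0) (by omega))
      · -- c :: w' <+ s.drop n  →  w' <+ s.drop (i0+1)
        intro h
        rw [List.cons_sublist_iff] at h
        obtain ⟨r₁, r₂, hsplit, hcr, hw'⟩ := h
        obtain ⟨u, v, huv⟩ := List.append_of_mem hcr
        -- the c inside r₁ sits at absolute index n + u.length ≥ i0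
        have hocc : [c] <+: List.drop (u.length) (List.drop n s) := by
          rw [hsplit, huv]
          refine ⟨v ++ r₂, ?_⟩
          have : (u ++ c :: v) ++ r₂ = u ++ (c :: (v ++ r₂)) := by simp
          rw [this, List.drop_left]
          rfl
        have hfu : f.toNat ≤ u.length := by
          by_contra hc
          exact hmin u.length (by omega) hocc
        have hr₂ : r₂ = List.drop (n + r₁.length) s := by
          have := List.drop_left (l₁ := r₁) (l₂ := r₂)
          rw [← hsplit] at this
          rw [← this, List.drop_drop]
        have hlen : i0 + 1 ≤ n + r₁.length := by
          have : u.length + 1 ≤ r₁.length := by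
            rw [huv]; simp
          omega
        refine hw'.trans ?_
        rw [hr₂]
        exact List.drop_sublist_drop_left s hlen

def pvKeyLtB (w b : String) : Bool :=
  (w.toList.length == b.toList.length && PySem.Chars.strLt w.toList b.toList)
    || b.toList.length < w.toList.length

theorem pvKeyLtB_iff (w b : String) : pvKeyLtB w b = true ↔ pvKey w < pvKey b := by
  unfold pvKeyLtB pvKey
  rw [Prod.Lex.lt_iff]
  simp [PySem.Chars.strLt]
  constructor
  · rintro (⟨h1, h2⟩ | h)
    · exact Or.inr ⟨by omega, h2⟩
    · exact Or.inl (by omega)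
  · rintro (h | ⟨h1, h2⟩)
    · exact Or.inr (by omega)
    · exact Or.inl ⟨by omega, h2⟩

def pvPick (a w : String) : String := if pvKeyLtB w a then w else a

-- A's guarded loop over d is the running key-minimum over the subsequence candidates.
theorem pvFoldA_eq_pick (s : List Char) (d : List String) (a : String) :
    List.foldl (fun ans w =>
      if (w.toList.length == ans.toList.length && PySem.Chars.strLt w.toList ans.toList)
          || ans.toList.length < w.toList.length then
        if List.foldl pvMatchStep w.toList s = [] then w else ans
      else ans) a d
    = List.foldl pvPick a (d.filter (fun w => decide (List.foldl pvMatchStep w.toList s = []))) := by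
  induction d generalizing a with
  | nil => rfl
  | cons w d ih =>
    have hstep : (if ((w.toList.length == a.toList.length && PySem.Chars.strLt w.toList a.toList)
          || decide (a.toList.length < w.toList.length)) = true then
            if List.foldl pvMatchStep w.toList s = [] then w else a
          else a)
        = (if List.foldl pvMatchStep w.toList s = [] then pvPick a w else a) := by
      unfold pvPick pvKeyLtB
      by_cases hs : List.foldl pvMatchStep w.toList s = [] <;> simp [hs]
    rw [List.foldl_cons, List.filter_cons, hstep]
    by_cases hs : List.foldl pvMatchStep w.toList s = []
    · rw [if_pos hs, if_pos (by simpa using hs), List.foldl_cons]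
      exact ih (pvPick a w)
    · rw [if_neg hs, if_neg (by simpa using hs)]
      exact ih a

theorem pvPick_empty (w : String) : pvPick "" w = w := by
  unfold pvPick pvKeyLtB
  cases hw : w.toList with
  | nil =>
    have hw0 : w = "" := String.toList_inj.mp (by simp [hw])
    simp [hw0]
  | cons c cs =>
    -- the goal's w.toList is generalized to c :: cs, so the length test computes
    rw [if_pos (by simp)]

theorem pvPick_key_le (a w : String) : pvKey (pvPick a w) ≤ pvKey a ∧ pvKey (pvPick a w) ≤ pvKey w := by
  unfold pvPick
  by_cases h : pvKeyLtB w a = true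
  · rw [if_pos h]
    exact ⟨le_of_lt ((pvKeyLtB_iff w a).mp h), le_refl _⟩
  · rw [if_neg h]
    exact ⟨le_refl _, le_of_not_gt (fun hc => h ((pvKeyLtB_iff w a).mpr hc))⟩

theorem pvFold_pick_mem (l : List String) (a : String) : List.foldl pvPick a l = a ∨ List.foldl pvPick a l ∈ l := by
  induction l generalizing a with
  | nil => exact Or.inl rfl
  | cons w l ih =>
    simp only [List.foldl_cons]
    rcases ih (pvPick a w) with h | h
    · rw [h]
      unfold pvPick
      split
      · exact Or.inr (List.mem_cons_self)
      · exact Or.inl rfl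
    · exact Or.inr (List.mem_cons_of_mem _ h)

theorem pvFold_pick_min (l : List String) (a : String) :
    pvKey (List.foldl pvPick a l) ≤ pvKey a ∧ ∀ y ∈ l, pvKey (List.foldl pvPick a l) ≤ pvKey y := by
  induction l generalizing a with
  | nil => exact ⟨le_refl _, by simp⟩
  | cons w l ih =>
    simp only [List.foldl_cons]
    obtain ⟨h1, h2⟩ := ih (pvPick a w)
    obtain ⟨ha, hw⟩ := pvPick_key_le a w
    refine ⟨h1.trans ha, ?_⟩
    intro y hy
    rcases List.mem_cons.mp hy with hy | hy
    · subst hy; exact h1.trans hw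
    · exact h2 y hy

theorem pvKey_inj : Function.Injective pvKey := by
  intro a b h
  unfold pvKey at h
  have := congrArg (fun p => (ofLex p).2) h
  simpa [String.toList_inj] using this

theorem pvFirstMatch_eq_headD (s : List Char) (l : List String) :
    pvFirstMatch s l = (l.filter (fun w => pvMatches s w.toList 0)).headD "" := by
  induction l with
  | nil => rfl
  | cons w ws ih =>
    by_cases h : pvMatches s w.toList 0 = true <;> simp [pvFirstMatch, h, ih]

-- head of the candidate list in sorted order = the running key-minimum over the candidates.
theorem pvHead_sorted_filter_eq_fold (d : List String) (p : String → Bool) :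
    ((PySem.List.sorted d pvKey).filter p).headD "" = List.foldl pvPick "" (d.filter p) := by
  have hperm : (List.filter p (PySem.List.sorted d pvKey)).Perm (List.filter p d) :=
    List.Perm.filter p (PySem.List.sorted_perm d pvKey false)
  cases hM : d.filter p with
  | nil =>
    rw [hM] at hperm
    rw [List.Perm.eq_nil hperm]
    rfl
  | cons m M' =>
    rw [hM] at hperm
    cases hL : List.filter p (PySem.List.sorted d pvKey) with
    | nil => rw [hL] at hperm; exact absurd hperm.symm (by simp)
    | cons h L' =>
      rw [hL] at hperm
      -- fold value r: the key-minimum of m :: M'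
      have hfold : List.foldl pvPick "" (m :: M') = List.foldl pvPick m M' := by
        simp only [List.foldl_cons, pvPick_empty]
      set r := List.foldl pvPick m M' with hr
      have hrmem : r ∈ m :: M' := by
        rcases pvFold_pick_mem M' m with h1 | h1
        · rw [hr, h1]; exact List.mem_cons_self
        · exact List.mem_cons_of_mem _ h1
      have hrmin : ∀ y ∈ m :: M', pvKey r ≤ pvKey y := by
        intro y hy
        obtain ⟨h1, h2⟩ := pvFold_pick_min M' m
        rcases List.mem_cons.mp hy with hy | hy
        · subst hy; exact h1
        · exact h2 y hy
      -- head h: the key-minimum of the same candidates, in sorted order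
      have hpair : (h :: L').Pairwise (fun a b => pvKey a ≤ pvKey b) := by
        rw [← hL]
        exact List.Pairwise.sublist List.filter_sublist (PySem.List.sorted_pairwise d pvKey)
      have hhmin : ∀ y ∈ h :: L', pvKey h ≤ pvKey y := by
        intro y hy
        rcases List.mem_cons.mp hy with hy | hy
        · subst hy; exact le_refl _
        · exact (List.pairwise_cons.mp hpair).1 y hy
      have h1 : pvKey h ≤ pvKey r := hhmin r (hperm.symm.subset hrmem)
      have h2 : pvKey r ≤ pvKey h := hrmin h (hperm.subset List.mem_cons_self)
      have : h = r := pvKey_inj (le_antisymm h1 h2)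
      simp [hfold, this]

-- ===== VERDICT (by name: the statement is the Claim_ definition above) =====
theorem findLongestWord_noSort_spec : Claim_equal_findLongestWord_noSort := by
  intro s d _
  show findLongestWord_noSort s d = findLongestWord_noSort_alt s d
  unfold findLongestWord_noSort findLongestWord_noSort_alt
  rw [pvFoldA_eq_pick, pvFirstMatch_eq_headD, pvHead_sorted_filter_eq_fold]
  congr 1
  apply List.filter_congr
  intro w _
  have h1 := pvMatches_iff_sublist s.toList w.toList 0 (by omega)
  have h2 := pvFoldA_iff_sublist s.toList w.toList
  simp only [Int.natCast_zero] at h1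
  rw [show pvMatches s.toList w.toList 0 = decide (List.Sublist w.toList (s.toList.drop 0)) from by
        rcases Bool.eq_false_or_eq_true (pvMatches s.toList w.toList 0) with h | h <;> simp_all]
  simp [h2, decide_eq_decide]
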